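-- pv_equiv track=rewrite | github.com/pandeliskirpoglou/algorithm_problems | assignment-2021-2/points_cover.py | final_sort
-- ===== SOURCE A (Python) =====
-- def final_sort(unsorted_list):
--     """
--     The final_sort method sorts the solution appropriately just for the case
--     of -g. In order to sort first by reverse length and then by the first element
--     we input the unsorted solution (unsorted list) and for every group of lines
--     with the same list, we sort them and then append them to the sorted list.
--
--     input:   -unsorted_lsit: list with the unsorted solution
--     output:  -sorted_list: list with the sorted solution
--     """
--     line_length = len(unsorted_list)
--     lines_by_length = []
--     sorted_list = []
--
--     while line_length > 0:
--
--         for line in unsorted_list: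
--             if len(line) == line_length:
--                 lines_by_length.append(
--                     sorted(line, key=lambda solution: solution[1]))
--
--         line_length -= 1
--
--         if lines_by_length:
--             lines_by_length = sorted(lines_by_length)
--
--             for line in lines_by_length:
--                 sorted_list.append(line)
--
--             lines_by_length.clear()
--     return sorted_list
-- ===== SOURCE B (Python) =====
-- def final_sort(unsorted_list):
--     groups = {}
--     for line in unsorted_list:
--         groups.setdefault(len(line), []).append(
--             sorted(line, key=lambda solution: solution[1]))
--     sorted_list = []
--     for length in range(len(unsorted_list), 0, -1):
--         if length in groups:
--             sorted_list.extend(sorted(groups[length]))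
--     return sorted_list
-- ===== Notes on version B (the rewrite author's own statement) =====
-- stated objective: faster
-- what changed: Replaces A's quadratic while-loop that rescans the whole list once per candidate length with a single grouping pass into a dict keyed by line length, then one descending range over the candidate lengths emitting each present group.
import Mathlib
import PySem

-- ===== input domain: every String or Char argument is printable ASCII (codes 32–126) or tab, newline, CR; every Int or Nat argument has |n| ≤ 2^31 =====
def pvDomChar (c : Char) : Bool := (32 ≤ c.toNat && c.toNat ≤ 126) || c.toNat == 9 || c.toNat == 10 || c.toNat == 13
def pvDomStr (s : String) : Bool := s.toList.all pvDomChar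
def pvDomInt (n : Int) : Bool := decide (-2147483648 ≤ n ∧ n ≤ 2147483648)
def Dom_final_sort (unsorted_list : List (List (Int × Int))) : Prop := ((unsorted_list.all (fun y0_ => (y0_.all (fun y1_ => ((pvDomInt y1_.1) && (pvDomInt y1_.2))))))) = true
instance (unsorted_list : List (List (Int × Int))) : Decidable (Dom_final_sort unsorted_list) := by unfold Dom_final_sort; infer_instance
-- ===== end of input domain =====

-- B replaces A's per-length rescans of the whole list with one dict grouping pass, then one descending range over the candidate lengths (measured faster).


-- ===== PORT A =====
-- sorted(line, key=lambda solution: solution[1])  (used by both Pythons)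
def lineSort (line : List (Int × Int)) : List (Int × Int) :=
  PySem.List.sorted line (fun p => p.2) false

-- Python's list-of-tuples comparison is lexicographic on lists of lexicographic pairs:
-- sorted(lines_by_length) / sorted(groups[length]) is PySem.List.sorted with this key.
def groupKey (l : List (Int × Int)) : List (Lex (Int × Int)) := l.map toLex

-- the 'while line_length > 0' loop, counting line_length down
def fsLoop (ul : List (List (Int × Int))) : Nat → List (List (Int × Int)) → List (List (Int × Int))
  | 0, acc => acc
  | Nat.succ L, acc =>
    let lbl := ul.foldl
      (fun g line => if line.length == Nat.succ L then g ++ [lineSort line] else g) []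
    fsLoop ul L (if lbl.isEmpty then acc else acc ++ PySem.List.sorted lbl groupKey false)

def final_sort (unsorted_list : List (List (Int × Int))) : List (List (Int × Int)) :=
  fsLoop unsorted_list unsorted_list.length []

-- ===== PORT B =====
def final_sort_alt (unsorted_list : List (List (Int × Int))) : List (List (Int × Int)) :=
  let groups : PySem.Dict Int (List (List (Int × Int))) :=
    unsorted_list.foldl
      (fun d line => d.modify (line.length : Int) [] (· ++ [lineSort line]))
      PySem.Dict.empty
  (PySem.List.pyRange (unsorted_list.length : Int) 0 (-1)).foldl
    (fun sorted_list L =>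
      if groups.contains L then
        sorted_list ++ PySem.List.sorted (groups.getD L []) groupKey false
      else sorted_list) []

-- ===== PRECONDITION & SPEC =====
def Spec_final_sort (unsorted_list : List (List (Int × Int))) (out : List (List (Int × Int))) : Prop := out = final_sort_alt unsorted_list
instance (unsorted_list : List (List (Int × Int))) (out : List (List (Int × Int))) : Decidable (Spec_final_sort unsorted_list out) := by unfold Spec_final_sort; infer_instance

-- ===== CLAIM (what is proved, stated in full; the proofs are below) =====
def Claim_equal_final_sort : Prop := ∀ (unsorted_list : List (List (Int × Int))), Dom_final_sort unsorted_list → Spec_final_sort unsorted_list (final_sort unsorted_list)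

-- ===== LEMMAS AND PROOFS =====

-- the group of lines of length L, each sorted, then sorted lexicographically
def emit (ul : List (List (Int × Int))) (L : Nat) : List (List (Int × Int)) :=
  PySem.List.sorted ((ul.filter (fun line => line.length == L)).map lineSort) groupKey false

-- the countdown [L, L-1, ..., 1]
def cnt (L : Nat) : List Nat := (List.range L).reverse.map Nat.succ

theorem cnt_succ (L : Nat) : cnt (L + 1) = (L + 1) :: cnt L := by
  simp [cnt, List.range_succ]

-- A's countdown loop unrolled to a flatMap of per-length groups
theorem fsLoop_eq (ul : List (List (Int × Int))) (L : Nat) (acc : List (List (Int × Int))) :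
    fsLoop ul L acc = acc ++ (cnt L).flatMap (emit ul) := by
  induction L generalizing acc with
  | zero => simp [fsLoop, cnt]
  | succ n ih =>
    rw [cnt_succ]
    simp only [fsLoop, PySem.List.foldl_append_if, List.nil_append]
    rw [ih]
    by_cases h : (ul.filter (fun line => line.length == n + 1)).map lineSort = []
    · simp [h, emit, PySem.List.sorted]
    · rw [if_neg (by simpa [List.isEmpty_iff] using h)]
      simp [emit, List.flatMap_cons]

theorem final_sort_eq (ul : List (List (Int × Int))) :
    final_sort ul = (cnt ul.length).flatMap (emit ul) := by
  simpa using fsLoop_eq ul ul.length []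

-- a conditional-extend loop is a flatMap over the filtered list
theorem foldl_append_ite_flat {α β : Type} (p : α → Prop) [DecidablePred p] (g : α → List β)
    (l : List α) (acc : List β) :
    l.foldl (fun acc x => if p x then acc ++ g x else acc) acc
      = acc ++ (l.filter (fun x => decide (p x))).flatMap g := by
  induction l generalizing acc with
  | nil => simp
  | cons a t ih =>
    by_cases h : p a <;> simp [h, ih]

-- dropping the elements that emit nothing does not change a flatMap
theorem flatMap_eq_flatMap_filter {α β : Type} (p : α → Bool) (g : α → List β) (l : List α)
    (h : ∀ x ∈ l, p x = false → g x = []) :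
    l.flatMap g = (l.filter p).flatMap g := by
  induction l with
  | nil => rfl
  | cons a t ih =>
    have ht := ih (fun x hx => h x (List.mem_cons_of_mem _ hx))
    by_cases hp : p a
    · simp [hp, ht]
    · have : g a = [] := h a List.mem_cons_self (by simpa using hp)
      simp [hp, ht, this]

-- B's grouping dict, named for the proofs
def grps (ul : List (List (Int × Int))) : PySem.Dict Int (List (List (Int × Int))) :=
  ul.foldl (fun d line => d.modify ((line.length : Int)) [] (· ++ [lineSort line]))
    PySem.Dict.empty

-- B with the let-binding named
theorem final_sort_alt_unfold (ul : List (List (Int × Int))) :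
    final_sort_alt ul
      = (PySem.List.pyRange (ul.length : Int) 0 (-1)).foldl
          (fun sorted_list L =>
            if (grps ul).contains L then
              sorted_list ++ PySem.List.sorted ((grps ul).getD L []) groupKey false
            else sorted_list) [] := rfl

-- the dict of B holds exactly the per-length groups
theorem groups_getD (ul : List (List (Int × Int))) (c : Int) :
    (grps ul).getD c []
      = (ul.filter (fun line => (line.length : Int) == c)).map lineSort := by
  unfold grps
  have h1 : ul.foldl (fun d line => d.modify ((line.length : Int)) [] (· ++ [lineSort line]))
        PySem.Dict.empty
      = (ul.map (fun line => ((line.length : Int), lineSort line))).foldl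
          (fun d p => d.modify p.1 [] (· ++ [p.2])) PySem.Dict.empty := by
    rw [List.foldl_map]
  rw [h1, PySem.Dict.getD_foldl_modify_append]
  simp [List.filter_map, Function.comp_def]

-- its key list is the set of occurring lengths, in first-occurrence order
theorem groups_keys (ul : List (List (Int × Int))) :
    (grps ul).keys
      = PySem.Set.ofList (ul.map (fun line => (line.length : Int))) := by
  unfold grps
  rw [PySem.Dict.keys_foldl_modify_key ul (fun line => ((line.length : Int))) []
    (fun _ line => (· ++ [lineSort line])) PySem.Dict.empty]
  simp [PySem.Set.update_nil_left]

-- range(len(ul), 0, -1) is the countdown, cast to Int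
theorem pyRange_countdown (n : Nat) :
    PySem.List.pyRange (n : Int) 0 (-1) = (cnt n).map (fun (L : Nat) => (L : Int)) := by
  induction n with
  | zero => simp [PySem.List.pyRange_neg_one_eq_nil, cnt]
  | succ m ih =>
    rw [PySem.List.pyRange_neg_one_cons (by exact_mod_cast Nat.succ_pos m), cnt_succ]
    simp only [List.map_cons]
    have h1 : ((m + 1 : Nat) : Int) - 1 = (m : Int) := by push_cast; ring
    rw [h1, ih]

-- per-length group emitted by B at the Int key of an occurring length
theorem emitB_cast (ul : List (List (Int × Int))) (L : Nat) :
    PySem.List.sorted ((grps ul).getD (L : Int) []) groupKey false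
      = emit ul L := by
  rw [groups_getD]
  unfold emit
  congr 2
  apply List.filter_congr
  intro line _
  simp

-- ===== VERDICT (by name: the statement is the Claim_ definition above) =====
theorem final_sort_spec : Claim_equal_final_sort := by
  unfold Claim_equal_final_sort
  intro ul _
  unfold Spec_final_sort
  rw [final_sort_eq, final_sort_alt_unfold]
  rw [foldl_append_ite_flat
    (fun L => ((grps ul).contains L) = true)
    (fun L => PySem.List.sorted ((grps ul).getD L []) groupKey false)]
  rw [List.nil_append, pyRange_countdown, List.filter_map, List.flatMap_map]
  simp only [emitB_cast]
  apply flatMap_eq_flatMap_filter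
  intro L _ hfalse
  have hnot : (L : Int) ∉ PySem.Set.ofList (ul.map (fun line => (line.length : Int))) := by
    have := hfalse
    rw [Function.comp_apply, decide_eq_false_iff_not] at this
    rw [PySem.Dict.contains_eq_decide_mem_keys, groups_keys] at this
    simpa using this
  have hfil : ul.filter (fun line => line.length == L) = [] := by
    rw [List.filter_eq_nil_iff]
    intro line hline
    simp only [beq_iff_eq]
    intro hlen
    exact hnot ((PySem.Set.mem_ofList _ _).mpr (List.mem_map.mpr ⟨line, hline, by rw [hlen]⟩))
  simp [emit, hfil, PySem.List.sorted]
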